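-- pv_equiv track=rewrite | github.com/aliwo/swblog | _drafts/word_puzzle4.py | solution
-- ===== SOURCE A (Python) =====
-- from collections import defaultdict
--
-- def match(a, b):
--     if len(b) > len(a):
--         return False
--     for a_char, b_char in zip(a, b):
--         if a_char != b_char:
--             return False
--     return True
--
-- def solution(strs, t):
--     # str_hash 만들기
--     str_hash = defaultdict(lambda: [])
--     for word in strs:
--         str_hash[word[0]].append(word)
--
--     # cache, cnt, window
--     cache = {0 : [len(x) for x in strs if match(t[0: 0 + len(x)], x)]}
--     cnt = 1
--     window = cache[0]
--
--     while True:
--         next_window = set()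
--         for length in window:
--
--             # 기저 사례. 단어 매칭에 성공한 케이스
--             if length == len(t):
--                 return cnt
--
--             # 다음 윈도우를 만들기 위해 cache 를 형성
--             if length not in cache:
--                 cache[length] = [length + len(x) for x in str_hash[t[length]] if match(t[length: length + len(x)], x)]
--             # next_window 에 합친다.
--             next_window.update(cache[length])
--
--         if not next_window:
--             return -1
--
--         window = next_window
--         cnt += 1
-- ===== SOURCE B (Python) =====
-- def solution(strs, t):
--     # Forward DP over prefix lengths: dp[i] = min words tiling t[:i] (INF = n+1).
--     # Edges only go forward, so one increasing pass settles every position.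
--     n = len(t)
--     INF = n + 1
--     dp = [0] + [INF] * n
--     for i in range(n):
--         if dp[i] <= n:
--             base = dp[i] + 1
--             for w in strs:
--                 j = i + len(w)
--                 if j <= n and t[i:j] == w and base < dp[j]:
--                     dp[j] = base
--     return dp[n] if dp[n] <= n else -1
-- ===== Notes on version B (the rewrite author's own statement) =====
-- stated objective: faster
-- what changed: Replaced the level-by-level BFS with its per-position cache dict and frontier sets by a single forward DP pass over prefix lengths (dp[i] = min words tiling t[:i]), which visits each (position, word) pair once.
-- intended difference: On empty t, A returns -1 because its BFS starts from an empty frontier and never tests the already-complete tiling, while B returns 0, the number of words needed to tile the empty string, which is the intended value. — e.g. on solution(["a"], ""): A returns -1, B returns 0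
import Mathlib
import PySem

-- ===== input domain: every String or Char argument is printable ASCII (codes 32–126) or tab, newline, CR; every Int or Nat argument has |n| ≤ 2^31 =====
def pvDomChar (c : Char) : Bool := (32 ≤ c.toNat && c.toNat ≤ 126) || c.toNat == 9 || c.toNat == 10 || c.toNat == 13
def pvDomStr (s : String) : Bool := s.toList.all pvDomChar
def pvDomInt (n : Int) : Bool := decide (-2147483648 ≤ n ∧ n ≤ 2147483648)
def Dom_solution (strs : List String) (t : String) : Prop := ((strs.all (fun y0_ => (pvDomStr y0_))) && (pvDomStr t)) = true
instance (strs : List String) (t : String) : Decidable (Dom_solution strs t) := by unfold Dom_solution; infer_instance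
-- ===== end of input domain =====

-- B replaces A's level-by-level BFS (cache dict + frontier sets) by a single forward DP pass
-- over prefix lengths; on empty t, B returns 0 where A returns -1 (see D_solution below).

-- ===== PORT A =====

-- match(a, b): the for-loop with early 'return False' is the conjunction over zip(a, b)
def pyMatch (a b : String) : Bool :=
  if PySem.Str.len b > PySem.Str.len a then false
  else (a.toList.zip b.toList).all (fun p => p.1 == p.2)

-- word[0]; 'none' is Python's IndexError (empty word), excluded by Pre_solution
def wordKey (w : String) : Char := (PySem.Str.pyGet? w 0).getD ' '

-- str_hash: defaultdict(list); str_hash[word[0]].append(word)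
def hashA (strs : List String) : PySem.Dict Char (List String) :=
  strs.foldl (fun d w => d.modify (wordKey w) [] (fun ws => ws ++ [w])) PySem.Dict.empty

-- [length + len(x) for x in str_hash[t[length]] if match(t[length: length+len(x)], x)]
-- (pyGet? none = Python IndexError on t[length]; unreachable under Pre_, proved below)
def succsA (strs : List String) (t : String) (i : Int) : List Int :=
  match PySem.Str.pyGet? t i with
  | none => []
  | some c =>
      (((hashA strs).getD c []).filter
        (fun x => pyMatch (PySem.Str.slice t (some i) (some (i + PySem.Str.len x))) x)).map
        (fun x => i + PySem.Str.len x)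

-- [len(x) for x in strs if match(t[0: 0+len(x)], x)]
def cache0A (strs : List String) (t : String) : List Int :=
  (strs.filter
    (fun x => pyMatch (PySem.Str.slice t (some 0) (some (0 + PySem.Str.len x))) x)).map
    (fun x => PySem.Str.len x)

-- the 'for length in window' body; 'none' = the early 'return cnt' (when length == len(t)).
-- (window may be a Python set; the returned cnt, the cache map and next_window are
-- independent of the iteration order, so iterating the PySem.Set list is exact.)
def innerA (strs : List String) (t : String) :
    List Int → PySem.Dict Int (List Int) → PySem.Set Int →
    Option (PySem.Dict Int (List Int) × PySem.Set Int)
  | [], cache, nw => some (cache, nw)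
  | len :: rest, cache, nw =>
      if len == PySem.Str.len t then none
      else
        let cache := if cache.contains len then cache else cache.insert len (succsA strs t len)
        innerA strs t rest cache (PySem.Set.update nw (cache.getD len []))

-- while True: … ; ported with fuel (len(t)+2 suffices under Pre_: frontier positions grow
-- strictly each pass, and the loop stops once they pass len(t)); 0-fuel value is never reached
def loopA (strs : List String) (t : String) :
    Nat → PySem.Dict Int (List Int) → List Int → Int → Int
  | 0, _, _, _ => -1
  | fuel+1, cache, window, cnt =>
      match innerA strs t window cache PySem.Set.empty with
      | none => cnt
      | some (cache', nw) =>
          if nw.isEmpty then -1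
          else loopA strs t fuel cache' nw (cnt + 1)

def solution (strs : List String) (t : String) : Int :=
  let _strHash := hashA strs
  let cache : PySem.Dict Int (List Int) := PySem.Dict.empty.insert 0 (cache0A strs t)
  loopA strs t (t.toList.length + 2) cache (cache.getD 0 []) 1

-- ===== PORT B =====

def solution_alt (strs : List String) (t : String) : Int :=
  let n := PySem.Str.len t
  let inf := n + 1
  let dp0 : List Int := 0 :: List.replicate n.toNat inf
  let dp := (PySem.List.pyRange 0 n 1).foldl (fun dp i =>
      if PySem.List.pyGetD dp i 0 ≤ n then
        let base := PySem.List.pyGetD dp i 0 + 1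
        strs.foldl (fun dp w =>
          let j := i + PySem.Str.len w
          if j ≤ n ∧ PySem.Str.slice t (some i) (some j) == w ∧ base < PySem.List.pyGetD dp j 0
          then PySem.List.pySetD dp j base
          else dp) dp
      else dp) dp0
  if PySem.List.pyGetD dp n 0 ≤ n then PySem.List.pyGetD dp n 0 else -1

-- ===== PRECONDITION & SPEC =====

-- Pre_ excludes only strs containing the empty string, on which A raises IndexError (word[0]).
def Pre_solution (strs : List String) (t : String) : Prop := ¬ ("" ∈ strs)
instance (strs : List String) (t : String) : Decidable (Pre_solution strs t) := by
  unfold Pre_solution; infer_instance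

def pvWitness_solution : List String × String := (["ab", "c"], "abc")

-- On empty t, A returns -1 (its BFS starts from an empty frontier and never tests the
-- already-complete tiling) while B returns 0, the number of words tiling "", the intended value.
def D_solution (strs : List String) (t : String) : Prop := t = ""
instance (strs : List String) (t : String) : Decidable (D_solution strs t) := by
  unfold D_solution; infer_instance

def Spec_solution (strs : List String) (t : String) (out : Int) : Prop :=
  ¬ D_solution strs t → out = solution_alt strs t
instance (strs : List String) (t : String) (out : Int) : Decidable (Spec_solution strs t out) := by
  unfold Spec_solution; infer_instance

def pvDiffWitness_solution : List String × String := (["a"], "")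
def pvDiffWitnessOut_solution : Int × Int := (-1, 0)

-- ===== CLAIM (what is proved, stated in full; the proofs are below) =====
def Claim_unchanged_solution : Prop := ∀ (strs : List String) (t : String),
  Dom_solution strs t → Pre_solution strs t → Spec_solution strs t (solution strs t)
def Claim_changed_solution : Prop :=
  Dom_solution (pvDiffWitness_solution.1) (pvDiffWitness_solution.2) ∧
  Pre_solution (pvDiffWitness_solution.1) (pvDiffWitness_solution.2) ∧
  D_solution (pvDiffWitness_solution.1) (pvDiffWitness_solution.2) ∧
  solution (pvDiffWitness_solution.1) (pvDiffWitness_solution.2) = pvDiffWitnessOut_solution.1 ∧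
  solution_alt (pvDiffWitness_solution.1) (pvDiffWitness_solution.2) = pvDiffWitnessOut_solution.2 ∧
  pvDiffWitnessOut_solution.1 ≠ pvDiffWitnessOut_solution.2
def Claim_exact_solution : Prop := ∀ (strs : List String) (t : String),
  Dom_solution strs t → Pre_solution strs t → D_solution strs t →
  solution strs t ≠ solution_alt strs t


-- ===== LEMMAS AND PROOFS =====

-- ---------- the common model: words matching at a position, and the bounded BFS frontier ----------

-- positions reachable from i by one word of strs that tiles t at i
def succM (strs : List String) (L : List Char) (i : Nat) : List Nat :=
  (strs.filter (fun w => w.toList.isPrefixOf (L.drop i))).map (fun w => i + w.toList.length)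

-- frB m k: positions reachable in exactly k words, expanding only positions < m
def frB (strs : List String) (L : List Char) (m : Nat) : Nat → List Nat
  | 0 => [0]
  | k+1 => ((frB strs L m k).filter (fun i => decide (i < m))).flatMap (succM strs L)

-- the common answer: least number of words reaching position |L|, else -1
def ansM (strs : List String) (L : List Char) : Int :=
  match (List.range (L.length + 2)).find?
      (fun k => decide (L.length ∈ frB strs L L.length k)) with
  | some k => (k : Int)
  | none => -1

theorem find?_range_some (p : Nat → Bool) (N c : Nat) (h1 : ∀ k < c, p k = false)
    (h2 : p c = true) (h3 : c < N) : (List.range N).find? p = some c := by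
  induction N with
  | zero => omega
  | succ N ih =>
    rcases Nat.lt_or_ge c N with h | h
    · rw [List.range_succ, List.find?_append, ih h]; rfl
    · have hc : c = N := by omega
      subst hc
      rw [List.range_succ, List.find?_append]
      have hnone : (List.range c).find? p = none := by
        rw [List.find?_eq_none]
        intro k hk
        simp only [List.mem_range] at hk
        simp [h1 k hk]
      rw [hnone]
      simp [h2]

theorem find?_range_none (p : Nat → Bool) (N : Nat) (h1 : ∀ k < N, p k = false) :
    (List.range N).find? p = none := by
  rw [List.find?_eq_none]; intro k hk; simp only [List.mem_range] at hk; simp [h1 k hk]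

theorem pyMatch_lists (a b : List Char) :
    (if b.length > a.length then false else (a.zip b).all (fun p => p.1 == p.2)) = b.isPrefixOf a := by
  induction a generalizing b with
  | nil => cases b <;> simp
  | cons x xs ih =>
    cases b with
    | nil => simp
    | cons y ys =>
      simp only [List.zip_cons_cons, List.all_cons, List.isPrefixOf]
      rw [← ih ys]
      by_cases h : ys.length > xs.length
      · simp only [List.length_cons, if_pos (by omega : ys.length + 1 > xs.length + 1), if_pos h]
        simp
      · simp only [List.length_cons, if_neg h, if_neg (by omega : ¬ (ys.length + 1 > xs.length + 1))]
        have hc : (x == y) = (y == x) := by simp [eq_comm]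
        rw [hc]

theorem pyMatch_eq (a b : String) : pyMatch a b = b.toList.isPrefixOf a.toList := by
  rw [← pyMatch_lists]
  simp only [pyMatch, PySem.Str.len_eq]
  congr 1
  simp

theorem mem_succM (strs : List String) (L : List Char) (i j : Nat) :
    j ∈ succM strs L i ↔ ∃ w ∈ strs, w.toList <+: L.drop i ∧ j = i + w.toList.length := by
  simp only [succM, List.mem_map, List.mem_filter]
  constructor
  · rintro ⟨w, ⟨hw, hpre⟩, rfl⟩
    exact ⟨w, hw, List.isPrefixOf_iff_prefix.mp hpre, rfl⟩
  · rintro ⟨w, hw, hpre, rfl⟩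
    exact ⟨w, ⟨hw, List.isPrefixOf_iff_prefix.mpr hpre⟩, rfl⟩

theorem succM_lb (strs : List String) (L : List Char) (hP : ¬ ("" ∈ strs)) (i j : Nat)
    (h : j ∈ succM strs L i) : i < j := by
  rw [mem_succM] at h
  obtain ⟨w, hw, hpre, rfl⟩ := h
  have hne : w.toList ≠ [] := by
    intro hnil
    have : w = "" := String.toList_inj.mp (by simpa using hnil)
    exact hP (this ▸ hw)
  have : 0 < w.toList.length := List.length_pos_iff.mpr hne
  omega

theorem succM_ub (strs : List String) (L : List Char) (i j : Nat) (hi : i ≤ L.length)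
    (h : j ∈ succM strs L i) : j ≤ L.length := by
  rw [mem_succM] at h
  obtain ⟨w, hw, hpre, rfl⟩ := h
  have := hpre.length_le
  simp only [List.length_drop] at this
  omega

theorem mem_frB_succ (strs : List String) (L : List Char) (m k j : Nat) :
    j ∈ frB strs L m (k+1) ↔ ∃ i, i ∈ frB strs L m k ∧ i < m ∧ j ∈ succM strs L i := by
  simp [frB, List.mem_flatMap, List.mem_filter, and_assoc]

theorem frB_bounds (strs : List String) (L : List Char) (hP : ¬ ("" ∈ strs)) (m k j : Nat)
    (hm : m ≤ L.length) (h : j ∈ frB strs L m k) : k ≤ j ∧ j ≤ L.length := by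
  induction k generalizing j with
  | zero => simp [frB] at h; omega
  | succ k ih =>
    rw [mem_frB_succ] at h
    obtain ⟨i, hi, him, hj⟩ := h
    have h1 := (ih i hi).1
    have h2 := succM_lb strs L hP i j hj
    have h3 := succM_ub strs L i j (by omega) hj
    omega

theorem frB_empty_ge (strs : List String) (L : List Char) (m k k' : Nat) (hk : k ≤ k')
    (h : frB strs L m k = []) : frB strs L m k' = [] := by
  induction k' with
  | zero => have : k = 0 := by omega
            subst this; exact h
  | succ k' ih =>
    rcases Nat.lt_or_ge k (k'+1) with h' | h'
    · have := ih (by omega)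
      simp [frB, this]
    · have : k = k' + 1 := by omega
      subst this; exact h

theorem frB_shift (strs : List String) (L : List Char) (hP : ¬ ("" ∈ strs)) (m k j : Nat)
    (h : j ∈ frB strs L (m+1) k) :
    j ∈ frB strs L m k ∨ ∃ k', k = k'+1 ∧ m ∈ frB strs L m k' ∧ j ∈ succM strs L m := by
  induction k generalizing j with
  | zero => exact Or.inl h
  | succ k ih =>
    rw [mem_frB_succ] at h
    obtain ⟨i, hi, him, hj⟩ := h
    rcases ih i hi with hL | ⟨k', rfl, hm, hsm⟩
    · rcases Nat.lt_or_ge i m with h' | h'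
      · exact Or.inl ((mem_frB_succ strs L m k j).mpr ⟨i, hL, h', hj⟩)
      · have : i = m := by omega
        subst this
        exact Or.inr ⟨k, rfl, hL, hj⟩
    · have := succM_lb strs L hP m i hsm
      omega

-- ---------- port A: bridging to the model ----------

theorem hashA_getD (strs : List String) (c : Char) :
    (hashA strs).getD c [] = strs.filter (fun w => wordKey w == c) := by
  unfold hashA
  rw [show (strs.foldl (fun d w => d.modify (wordKey w) [] (fun ws => ws ++ [w])) PySem.Dict.empty)
      = ((strs.map (fun w => (wordKey w, w))).foldl
          (fun d p => d.modify p.1 [] (fun ws => ws ++ [p.2])) PySem.Dict.empty)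
    from (List.foldl_map (f := fun w => (wordKey w, w))
      (g := fun d p => PySem.Dict.modify d p.1 [] (fun ws => ws ++ [p.2]))).symm]
  rw [PySem.Dict.getD_foldl_modify_append]
  rw [List.filter_map]
  simp [Function.comp_def]

theorem wordKey_of_prefix (L : List Char) (w : String) (i : Nat) (hw : w.toList ≠ [])
    (hpre : w.toList <+: L.drop i) (hi : i < L.length) : wordKey w = L[i] := by
  unfold wordKey
  have h0 : 0 < w.toList.length := List.length_pos_iff.mpr hw
  rw [show ((0:Int)) = ((0:Nat):Int) by simp, PySem.Str.pyGet?_natCast]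
  rw [List.getElem?_eq_getElem h0]
  simp only [Option.getD_some]
  have h1 : w.toList[0] = (L.drop i)[0]'(by
    have := hpre.length_le
    simp only [List.length_drop]
    omega) := List.IsPrefix.getElem hpre h0
  rw [h1]
  simp [List.getElem_drop]

theorem pyMatch_slice (t x : String) (i : Nat) :
    pyMatch (PySem.Str.slice t (some (i : Int)) (some ((i : Int) + PySem.Str.len x))) x
      = x.toList.isPrefixOf (t.toList.drop i) := by
  rw [pyMatch_eq]
  have hs : (PySem.Str.slice t (some (i : Int)) (some ((i : Int) + PySem.Str.len x))).toList
      = (t.toList.drop i).take x.toList.length := by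
    rw [PySem.Str.toList_slice]
    simp only [PySem.Str.len_eq]
    rw [show PySem.Chars.slice t.toList (some (i:Int)) (some ((i:Int) + (x.toList.length : Int)))
        = PySem.List.slice t.toList (some (i:Int)) (some ((i:Int) + (x.toList.length : Int)))
      from PySem.Chars.slice_eq_listSlice _ _ _]
    exact PySem.List.slice_natCast_add _ _ _
  rw [hs]
  rw [Bool.eq_iff_iff]
  simp only [List.isPrefixOf_iff_prefix]
  constructor
  · intro hc; exact (List.prefix_take_iff.mp hc).1
  · intro h; exact List.prefix_take_iff.mpr ⟨h, le_refl _⟩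

theorem cache0A_eq (strs : List String) (t : String) :
    cache0A strs t = List.map (fun m : Nat => (m : Int)) (succM strs t.toList 0) := by
  unfold cache0A succM
  have hf : strs.filter (fun x => pyMatch (PySem.Str.slice t (some 0) (some (0 + PySem.Str.len x))) x)
      = strs.filter (fun w => w.toList.isPrefixOf (t.toList.drop 0)) := by
    apply List.filter_congr
    intro x _
    have h := pyMatch_slice t x 0
    simpa using h
  rw [hf]
  rw [List.map_map]
  apply List.map_congr_left
  intro w _
  simp [PySem.Str.len_eq, Function.comp]

theorem succsA_eq (strs : List String) (t : String) (hP : ¬ ("" ∈ strs)) (i : Nat)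
    (hi : i < t.toList.length) :
    succsA strs t (i : Int) = List.map (fun m : Nat => (m : Int)) (succM strs t.toList i) := by
  unfold succsA succM
  rw [PySem.Str.pyGet?_natCast, List.getElem?_eq_getElem hi]
  simp only
  rw [hashA_getD, List.filter_filter]
  have hf : strs.filter (fun x =>
        pyMatch (PySem.Str.slice t (some (i:Int)) (some ((i:Int) + PySem.Str.len x))) x
        && (wordKey x == t.toList[i]))
      = strs.filter (fun w => w.toList.isPrefixOf (t.toList.drop i)) := by
    apply List.filter_congr
    intro x hx
    rw [pyMatch_slice]
    by_cases h : x.toList.isPrefixOf (t.toList.drop i)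
    · have hpre : x.toList <+: t.toList.drop i := List.isPrefixOf_iff_prefix.mp h
      have hne : x.toList ≠ [] := by
        intro hnil
        have hx0 : x = "" := String.toList_inj.mp (by simp [hnil])
        exact hP (hx0 ▸ hx)
      rw [wordKey_of_prefix t.toList x i hne hpre hi]
      simp [h]
    · simp [h]
  rw [hf]
  rw [List.map_map]
  apply List.map_congr_left
  intro w _
  simp [PySem.Str.len_eq, Function.comp]

-- ---------- port A: loop invariants ----------

def SuccSpecI (strs : List String) (t : String) (i : Nat) (v : List Int) : Prop :=
  ∀ x : Int, x ∈ v ↔ ∃ j : Nat, x = (j : Int) ∧ j ∈ succM strs t.toList i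

def CacheInv (strs : List String) (t : String) (cache : PySem.Dict Int (List Int)) : Prop :=
  ∀ k v, cache.get? k = some v → ∃ i : Nat, k = (i : Int) ∧ i ≤ t.toList.length ∧ SuccSpecI strs t i v

theorem innerA_none_iff (strs : List String) (t : String) (window : List Int)
    (cache : PySem.Dict Int (List Int)) (s : PySem.Set Int) :
    innerA strs t window cache s = none ↔ (PySem.Str.len t) ∈ window := by
  induction window generalizing cache s with
  | nil => simp [innerA]
  | cons x rest ih =>
    by_cases h : x == PySem.Str.len t
    · have hx : x = PySem.Str.len t := by simpa using h
      simp [innerA, h, hx]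
    · have hx : x ≠ PySem.Str.len t := by simpa using h
      simp only [innerA]
      rw [if_neg h, ih]
      simp only [List.mem_cons]
      constructor
      · exact Or.inr
      · rintro (heq | hmem)
        · exact absurd heq.symm hx
        · exact hmem

theorem cacheStep (strs : List String) (t : String) (hP : ¬ ("" ∈ strs))
    (cache : PySem.Dict Int (List Int)) (hc : CacheInv strs t cache) (j0 : Nat)
    (hj0 : j0 < t.toList.length) :
    CacheInv strs t (if cache.contains ((j0 : Nat) : Int) then cache
      else cache.insert ((j0 : Nat) : Int) (succsA strs t ((j0 : Nat) : Int))) ∧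
    (∀ y, y ∈ (if cache.contains ((j0 : Nat) : Int) then cache
      else cache.insert ((j0 : Nat) : Int) (succsA strs t ((j0 : Nat) : Int))).getD ((j0 : Nat) : Int) []
      ↔ ∃ j : Nat, y = (j : Int) ∧ j ∈ succM strs t.toList j0) := by
  by_cases hcon : cache.contains ((j0 : Nat) : Int)
  · rw [if_pos hcon]
    refine ⟨hc, ?_⟩
    rw [PySem.Dict.contains_eq_isSome_get?] at hcon
    obtain ⟨v, hv⟩ := Option.isSome_iff_exists.mp hcon
    obtain ⟨i, hik, _, hspec⟩ := hc _ _ hv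
    have hij : i = j0 := by exact_mod_cast hik.symm
    subst hij
    intro y
    have : cache.getD ((i : Nat) : Int) [] = v := by
      unfold PySem.Dict.getD
      rw [hv]
      rfl
    rw [this]
    exact hspec y
  · rw [if_neg hcon]
    have hsp : SuccSpecI strs t j0 (succsA strs t ((j0 : Nat) : Int)) := by
      intro y
      rw [succsA_eq strs t hP j0 hj0]
      simp only [List.mem_map]
      constructor
      · rintro ⟨m, hm, rfl⟩; exact ⟨m, rfl, hm⟩
      · rintro ⟨j, rfl, hj⟩; exact ⟨j, hj, rfl⟩
    constructor
    · intro k v hkv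
      by_cases hk : k = ((j0 : Nat) : Int)
      · subst hk
        rw [PySem.Dict.get?_insert_self] at hkv
        cases hkv
        exact ⟨j0, rfl, by omega, hsp⟩
      · rw [PySem.Dict.get?_insert_of_ne _ _ hk] at hkv
        exact hc _ _ hkv
    · intro y
      have : (cache.insert ((j0:Nat):Int) (succsA strs t ((j0:Nat):Int))).getD ((j0:Nat):Int) []
          = succsA strs t ((j0:Nat):Int) := by
        unfold PySem.Dict.getD
        rw [PySem.Dict.get?_insert_self]
        rfl
      rw [this]
      exact hsp y

theorem innerA_some (strs : List String) (t : String) (hP : ¬ ("" ∈ strs)) :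
    ∀ (window : List Int) (cache : PySem.Dict Int (List Int)) (s : PySem.Set Int),
    CacheInv strs t cache →
    (∀ x ∈ window, ∃ j : Nat, x = (j : Int) ∧ j ≤ t.toList.length) →
    ((t.toList.length : Int) ∉ window) →
    ∃ cache' s', innerA strs t window cache s = some (cache', s') ∧ CacheInv strs t cache' ∧
      (∀ x, x ∈ s' ↔ x ∈ s ∨ ∃ j : Nat, x = (j : Int) ∧
        ∃ i : Nat, (i : Int) ∈ window ∧ i < t.toList.length ∧ j ∈ succM strs t.toList i) := by
  intro window
  induction window with
  | nil =>
    intro cache s hc _ _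
    refine ⟨cache, s, rfl, hc, ?_⟩
    simp
  | cons x rest ih =>
    intro cache s hc hwin hnot
    obtain ⟨j0, rfl, hj0le⟩ := hwin x (List.mem_cons_self)
    have hj0 : j0 < t.toList.length := by
      have : ((j0 : Nat) : Int) ≠ ((t.toList.length : Nat) : Int) := by
        intro hh; exact hnot (hh ▸ List.mem_cons_self)
      have : j0 ≠ t.toList.length := by exact_mod_cast this
      omega
    have hbeq : (((j0 : Nat) : Int) == PySem.Str.len t) = false := by
      rw [PySem.Str.len_eq]
      simp only [beq_eq_false_iff_ne, ne_eq, Int.natCast_inj]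
      omega
    obtain ⟨hc2, hv2⟩ := cacheStep strs t hP cache hc j0 hj0
    set cache2 := (if cache.contains ((j0 : Nat) : Int) then cache
      else cache.insert ((j0 : Nat) : Int) (succsA strs t ((j0 : Nat) : Int))) with hcache2
    obtain ⟨cache', s', heq, hc', hs'⟩ := ih cache2
      (PySem.Set.update s (cache2.getD ((j0 : Nat) : Int) []))
      hc2 (fun y hy => hwin y (List.mem_cons_of_mem _ hy))
      (fun hmem => hnot (List.mem_cons_of_mem _ hmem))
    refine ⟨cache', s', ?_, hc', ?_⟩
    · have hcond : ¬ ((((j0 : Nat) : Int) == PySem.Str.len t) = true) := by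
        rw [hbeq]; simp
      simp only [innerA]
      rw [if_neg hcond]
      exact heq
    · intro y
      rw [hs' y, PySem.Set.mem_update]
      constructor
      · rintro (⟨hy | hy⟩ | ⟨j, rfl, i, hiw, hin, hj⟩)
        · exact Or.inl hy
        · rcases (hv2 y).mp hy with ⟨j, rfl, hj⟩
          exact Or.inr ⟨j, rfl, j0, List.mem_cons_self, hj0, hj⟩
        · exact Or.inr ⟨j, rfl, i, List.mem_cons_of_mem _ hiw, hin, hj⟩
      · rintro (hy | ⟨j, rfl, i, hiw, hin, hj⟩)
        · exact Or.inl (Or.inl hy)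
        · rcases List.mem_cons.mp hiw with hx | hx
          · have : i = j0 := by exact_mod_cast hx
            subst this
            exact Or.inl (Or.inr ((hv2 _).mpr ⟨j, rfl, hj⟩))
          · exact Or.inr ⟨j, rfl, i, hx, hin, hj⟩

theorem loopA_eq (strs : List String) (t : String) (hP : ¬ ("" ∈ strs))
    (hn : 1 ≤ t.toList.length) :
    ∀ (fuel : Nat) (cache : PySem.Dict Int (List Int)) (window : List Int) (c : Nat),
    1 ≤ c → CacheInv strs t cache →
    (∀ x, x ∈ window ↔ ∃ j : Nat, x = (j : Int) ∧ j ∈ frB strs t.toList t.toList.length c) →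
    (∀ k < c, t.toList.length ∉ frB strs t.toList t.toList.length k) →
    t.toList.length + 2 ≤ fuel + c →
    loopA strs t fuel cache window (c : Int) = ansM strs t.toList := by
  intro fuel
  induction fuel with
  | zero =>
    intro cache window c _ _ _ hmiss hfuel
    show (-1 : Int) = ansM strs t.toList
    unfold ansM
    rw [find?_range_none _ _ (fun k hk => by
      simp only [decide_eq_false_iff_not]
      exact hmiss k (by omega))]
  | succ fuel ih =>
    intro cache window c hc1 hcache hwininv hmiss hfuel
    by_cases hwn : (PySem.Str.len t) ∈ window
    · have hmem : t.toList.length ∈ frB strs t.toList t.toList.length c := by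
        rw [PySem.Str.len_eq] at hwn
        obtain ⟨j, hj, hjf⟩ := (hwininv _).mp hwn
        have : j = t.toList.length := by exact_mod_cast hj.symm
        exact this ▸ hjf
      have hcn : c ≤ t.toList.length :=
        (frB_bounds strs t.toList hP _ _ _ (le_refl _) hmem).1
      simp only [loopA]
      rw [(innerA_none_iff strs t window cache PySem.Set.empty).mpr hwn]
      dsimp only
      unfold ansM
      rw [find?_range_some _ _ c
        (fun k hk => by simp only [decide_eq_false_iff_not]; exact hmiss k hk)
        (by simp only [decide_eq_true_eq]; exact hmem)
        (by omega)]
    · have hnotc : t.toList.length ∉ frB strs t.toList t.toList.length c := by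
        intro hmem
        exact hwn (by
          rw [PySem.Str.len_eq]
          exact (hwininv _).mpr ⟨t.toList.length, rfl, hmem⟩)
      obtain ⟨cache', s', heq, hc', hs'⟩ := innerA_some strs t hP window cache PySem.Set.empty
        hcache
        (fun x hx => by
          obtain ⟨j, hj, hjf⟩ := (hwininv x).mp hx
          exact ⟨j, hj, (frB_bounds strs t.toList hP _ _ _ (le_refl _) hjf).2⟩)
        (by rw [← PySem.Str.len_eq]; exact hwn)
      have hs'c : ∀ x, x ∈ s' ↔ ∃ j : Nat, x = (j : Int) ∧
          j ∈ frB strs t.toList t.toList.length (c+1) := by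
        intro x
        rw [hs' x]
        constructor
        · rintro (hx | ⟨j, rfl, i, hiw, hin, hj⟩)
          · exact absurd hx (by simp [PySem.Set.empty])
          · refine ⟨j, rfl, ?_⟩
            rw [mem_frB_succ]
            refine ⟨i, ?_, hin, hj⟩
            obtain ⟨j', hj', hjf⟩ := (hwininv _).mp hiw
            have : i = j' := by exact_mod_cast hj'
            exact this ▸ hjf
        · rintro ⟨j, rfl, hj⟩
          rw [mem_frB_succ] at hj
          obtain ⟨i, hif, hin, hj⟩ := hj
          exact Or.inr ⟨j, rfl, i, (hwininv _).mpr ⟨i, rfl, hif⟩, hin, hj⟩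
      simp only [loopA]
      rw [heq]
      dsimp only
      by_cases hemp : s'.isEmpty
      · rw [if_pos hemp]
        have hnil : frB strs t.toList t.toList.length (c+1) = [] := by
          rw [List.eq_nil_iff_forall_not_mem]
          intro j hj
          have : ((j : Nat) : Int) ∈ s' := (hs'c _).mpr ⟨j, rfl, hj⟩
          rw [List.isEmpty_iff] at hemp
          simp [hemp] at this
        unfold ansM
        rw [find?_range_none _ _ (fun k hk => by
          simp only [decide_eq_false_iff_not]
          rcases Nat.lt_or_ge k c with h' | h'
          · exact hmiss k h'
          · rcases Nat.eq_or_lt_of_le h' with rfl | h''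
            · exact hnotc
            · rw [frB_empty_ge strs t.toList _ (c+1) k (by omega) hnil]
              simp)]
      · rw [if_neg hemp]
        have : ((c : Int) + 1) = (((c + 1 : Nat)) : Int) := by push_cast; ring
        rw [this]
        apply ih cache' s' (c+1) (by omega) hc' hs'c
        · intro k hk
          rcases Nat.lt_or_ge k c with h' | h'
          · exact hmiss k h'
          · have : k = c := by omega
            subst this
            exact hnotc
        · omega

theorem A_main (strs : List String) (t : String) (hP : ¬ ("" ∈ strs))
    (hn : 1 ≤ t.toList.length) : solution strs t = ansM strs t.toList := by
  unfold solution
  dsimp only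
  have hget : (PySem.Dict.empty.insert (0:Int) (cache0A strs t)).getD (0:Int) []
      = cache0A strs t := by
    unfold PySem.Dict.getD
    rw [PySem.Dict.get?_insert_self]
    rfl
  rw [hget]
  rw [show ((1:Int)) = (((1:Nat)):Int) by simp]
  apply loopA_eq strs t hP hn _ _ _ (1:Nat) (le_refl _)
  · intro k v hkv
    by_cases hk : k = (0:Int)
    · subst hk
      rw [PySem.Dict.get?_insert_self] at hkv
      cases hkv
      refine ⟨0, by simp, by omega, ?_⟩
      intro y
      rw [cache0A_eq]
      simp only [List.mem_map]
      constructor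
      · rintro ⟨m, hm, rfl⟩; exact ⟨m, rfl, by simpa using hm⟩
      · rintro ⟨j, rfl, hj⟩; exact ⟨j, by simpa using hj, rfl⟩
    · rw [PySem.Dict.get?_insert_of_ne _ _ hk] at hkv
      simp [PySem.Dict.get?, PySem.Dict.empty] at hkv
  · intro x
    rw [cache0A_eq]
    simp only [List.mem_map]
    constructor
    · rintro ⟨m, hm, rfl⟩
      refine ⟨m, rfl, ?_⟩
      rw [mem_frB_succ]
      exact ⟨0, by simp [frB], by omega, by simpa using hm⟩
    · rintro ⟨j, rfl, hj⟩
      rw [mem_frB_succ] at hj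
      obtain ⟨i, hif, _, hj⟩ := hj
      have : i = 0 := by simpa [frB] using hif
      subst this
      exact ⟨j, by simpa using hj, rfl⟩
  · intro k hk
    have : k = 0 := by omega
    subst this
    simp only [frB, List.mem_singleton]
    omega
  · omega

-- ---------- port B: loop invariants ----------

theorem getD_set_int (l : List Int) (i j : Nat) (a : Int) :
    (l.set i a).getD j 0 = if i = j ∧ i < l.length then a else l.getD j 0 := by
  rw [List.getD_eq_getElem?_getD, List.getD_eq_getElem?_getD, List.getElem?_set]
  by_cases h1 : i = j
  · by_cases h2 : i < l.length
    · rw [if_pos h1, if_pos h2, if_pos ⟨h1, h2⟩]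
      rfl
    · rw [if_pos h1, if_neg h2, if_neg (fun hc => h2 hc.2)]
      subst h1
      rw [List.getElem?_eq_none (by omega)]
  · rw [if_neg h1, if_neg (fun hc => h1 hc.1)]

-- the body of B's inner 'for w in strs' loop, with position i = m and base fixed
def relaxF (t : String) (m : Nat) (base : Int) : List Int → String → List Int :=
  fun dp w =>
    let j := ((m : Nat) : Int) + PySem.Str.len w
    if j ≤ PySem.Str.len t ∧ PySem.Str.slice t (some ((m : Nat) : Int)) (some j) == w
        ∧ base < PySem.List.pyGetD dp j 0
    then PySem.List.pySetD dp j base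
    else dp

theorem sliceEq (t w : String) (m : Nat) :
    (PySem.Str.slice t (some ((m:Nat):Int)) (some (((m:Nat):Int) + PySem.Str.len w)) == w) = true
      ↔ w.toList <+: t.toList.drop m := by
  rw [beq_iff_eq, ← String.toList_inj]
  have hs : (PySem.Str.slice t (some ((m:Nat):Int)) (some (((m:Nat):Int) + PySem.Str.len w))).toList
      = (t.toList.drop m).take w.toList.length := by
    rw [PySem.Str.toList_slice]
    simp only [PySem.Str.len_eq]
    rw [show PySem.Chars.slice t.toList (some ((m:Nat):Int)) (some (((m:Nat):Int) + (w.toList.length : Int)))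
        = PySem.List.slice t.toList (some ((m:Nat):Int)) (some (((m:Nat):Int) + (w.toList.length : Int)))
      from PySem.Chars.slice_eq_listSlice _ _ _]
    exact PySem.List.slice_natCast_add _ _ _
  rw [hs]
  constructor
  · intro h
    rw [← h]
    exact List.take_prefix _ _
  · intro h
    exact (List.prefix_iff_eq_take.mp h).symm

-- one relaxF application, characterized on .getD
theorem relaxF_step (t : String) (m : Nat) (base : Int) (dp : List Int) (w : String)
    (hlen : dp.length = t.toList.length + 1) :
    (relaxF t m base dp w).length = dp.length ∧
    (((¬ (m + w.toList.length ≤ t.toList.length ∧ w.toList <+: t.toList.drop m ∧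
          base < dp.getD (m + w.toList.length) 0)) ∧
        (∀ j : Nat, (relaxF t m base dp w).getD j 0 = dp.getD j 0)) ∨
      (m + w.toList.length ≤ t.toList.length ∧ w.toList <+: t.toList.drop m ∧
        base < dp.getD (m + w.toList.length) 0 ∧
        (∀ j : Nat, (relaxF t m base dp w).getD j 0 =
          if j = m + w.toList.length then base else dp.getD j 0))) := by
  unfold relaxF
  simp only [PySem.Str.len_eq]
  have hj : ((m:Nat):Int) + (w.toList.length:Int) = (((m + w.toList.length : Nat)):Int) := by
    push_cast; ring
  have hget : PySem.List.pyGetD dp (((m:Nat):Int) + (w.toList.length:Int)) 0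
      = dp.getD (m + w.toList.length) 0 := by
    rw [hj, PySem.List.pyGetD_natCast]
  have hciff : (((m:Nat):Int) + (w.toList.length:Int) ≤ (t.toList.length : Int)
      ∧ (PySem.Str.slice t (some ((m:Nat):Int)) (some (((m:Nat):Int) + (w.toList.length:Int))) == w) = true
      ∧ base < PySem.List.pyGetD dp (((m:Nat):Int) + (w.toList.length:Int)) 0)
      ↔ (m + w.toList.length ≤ t.toList.length ∧ w.toList <+: t.toList.drop m ∧
          base < dp.getD (m + w.toList.length) 0) := by
    rw [hget]
    constructor
    · rintro ⟨h1, h2, h3⟩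
      refine ⟨by exact_mod_cast h1, ?_, h3⟩
      rw [← sliceEq t w m]
      simpa [PySem.Str.len_eq] using h2
    · rintro ⟨h1, h2, h3⟩
      refine ⟨by exact_mod_cast h1, ?_, h3⟩
      have := (sliceEq t w m).mpr h2
      simpa [PySem.Str.len_eq] using this
  by_cases hsem : (m + w.toList.length ≤ t.toList.length ∧ w.toList <+: t.toList.drop m ∧
      base < dp.getD (m + w.toList.length) 0)
  · rw [if_pos (hciff.mpr hsem)]
    obtain ⟨hjn, hpre, hlt⟩ := hsem
    have hset : PySem.List.pySetD dp (((m:Nat):Int) + (w.toList.length:Int)) base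
        = dp.set (m + w.toList.length) base := by
      unfold PySem.List.pySetD
      rw [hj, PySem.List.pySet?_natCast _ _ _ (by omega)]
      rfl
    constructor
    · rw [hset]; simp [List.length_set]
    · right
      refine ⟨hjn, hpre, hlt, ?_⟩
      intro j
      rw [hset, getD_set_int]
      by_cases hje : j = m + w.toList.length
      · rw [if_pos hje, if_pos ⟨hje.symm, by omega⟩]
      · rw [if_neg hje, if_neg (fun hc' => hje hc'.1.symm)]
  · rw [if_neg (fun hh => hsem (hciff.mp hh))]
    exact ⟨rfl, Or.inl ⟨hsem, fun _ => rfl⟩⟩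

theorem relaxB_spec (t : String) (m : Nat) (base : Int) :
    ∀ (ws : List String) (dp : List Int), dp.length = t.toList.length + 1 →
    (ws.foldl (relaxF t m base) dp).length = t.toList.length + 1 ∧
    (∀ j : Nat, (ws.foldl (relaxF t m base) dp).getD j 0 = dp.getD j 0 ∨
      ((ws.foldl (relaxF t m base) dp).getD j 0 = base ∧
        ∃ w ∈ ws, w.toList <+: t.toList.drop m ∧ j = m + w.toList.length ∧ j ≤ t.toList.length)) ∧
    (∀ j : Nat, (ws.foldl (relaxF t m base) dp).getD j 0 ≤ dp.getD j 0) ∧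
    (∀ w ∈ ws, ∀ j : Nat, j = m + w.toList.length → j ≤ t.toList.length →
      w.toList <+: t.toList.drop m →
      (ws.foldl (relaxF t m base) dp).getD j 0 ≤ base) := by
  intro ws
  induction ws with
  | nil =>
    intro dp hlen
    refine ⟨hlen, fun j => Or.inl rfl, fun j => le_refl _, fun w hw => absurd hw (by simp)⟩
  | cons w ws ih =>
    intro dp hlen
    obtain ⟨hlen1, hstep⟩ := relaxF_step t m base dp w hlen
    set dp1 := relaxF t m base dp w with hdp1
    obtain ⟨hlen', hb, hcmp, hd⟩ := ih dp1 (by omega)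
    have hcmp1 : ∀ j : Nat, dp1.getD j 0 ≤ dp.getD j 0 := by
      intro j
      rcases hstep with ⟨_, heq⟩ | ⟨_, _, hlt, hif⟩
      · rw [heq j]
      · rw [hif j]
        by_cases hje : j = m + w.toList.length
        · rw [if_pos hje, hje]; omega
        · rw [if_neg hje]
    refine ⟨hlen', ?_, ?_, ?_⟩
    · intro j
      rcases hb j with heq | ⟨hbase, w', hw', hpre, hj, hjn⟩
      · rcases hstep with ⟨_, heq1⟩ | ⟨hjn, hpre, hlt, hif⟩
        · rw [List.foldl_cons]; rw [heq, heq1 j]; exact Or.inl rfl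
        · rw [List.foldl_cons, heq, hif j]
          by_cases hje : j = m + w.toList.length
          · rw [if_pos hje]
            exact Or.inr ⟨rfl, w, List.mem_cons_self, hpre, hje, by omega⟩
          · rw [if_neg hje]; exact Or.inl rfl
      · rw [List.foldl_cons]
        exact Or.inr ⟨hbase, w', List.mem_cons_of_mem _ hw', hpre, hj, hjn⟩
    · intro j
      rw [List.foldl_cons]
      exact le_trans (hcmp j) (hcmp1 j)
    · intro w' hw' j hj hjn hpre
      rcases List.mem_cons.mp hw' with rfl | hw'
      · rw [List.foldl_cons]
        rcases hstep with ⟨hnc, heq1⟩ | ⟨hjn1, hpre1, hlt, hif⟩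
        · have hle : dp1.getD j 0 ≤ base := by
            rw [heq1 j]
            by_cases hgt : base < dp.getD j 0
            · exact absurd ⟨hj ▸ hjn, hpre, hj ▸ hgt⟩ hnc
            · omega
          exact le_trans (hcmp j) hle
        · have hle : dp1.getD j 0 ≤ base := by
            rw [hif j, if_pos hj]
          exact le_trans (hcmp j) hle
      · rw [List.foldl_cons]
        exact hd w' hw' j hj hjn hpre

def InvB (strs : List String) (t : String) (m : Nat) (dp : List Int) : Prop :=
  dp.length = t.toList.length + 1 ∧
  (∀ j : Nat, 0 ≤ dp.getD j 0) ∧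
  (∀ j : Nat, j ≤ t.toList.length → dp.getD j 0 ≤ (t.toList.length : Int) →
    j ∈ frB strs t.toList t.toList.length ((dp.getD j 0).toNat)) ∧
  (∀ j k : Nat, j ∈ frB strs t.toList m k → dp.getD j 0 ≤ (k : Int))

theorem invB_init (strs : List String) (t : String) :
    InvB strs t 0 (0 :: List.replicate t.toList.length ((t.toList.length : Int) + 1)) := by
  have hget : ∀ j : Nat, (0 :: List.replicate t.toList.length ((t.toList.length : Int) + 1)).getD j 0
      = if j = 0 then 0 else if j ≤ t.toList.length then (t.toList.length : Int) + 1 else 0 := by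
    intro j
    cases j with
    | zero => simp
    | succ j =>
      rw [List.getD_cons_succ]
      by_cases hj : j < t.toList.length
      · rw [if_neg (by omega), if_pos (by omega)]
        rw [List.getD_eq_getElem?_getD, List.getElem?_replicate, if_pos hj]
        rfl
      · rw [if_neg (by omega), if_neg (by omega)]
        rw [List.getD_eq_getElem?_getD, List.getElem?_replicate, if_neg hj]
        rfl
  refine ⟨by simp, ?_, ?_, ?_⟩
  · intro j
    rw [hget j]
    split_ifs <;> omega
  · intro j hj hle
    rw [hget j] at hle ⊢
    by_cases hj0 : j = 0
    · subst hj0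
      simp only [if_pos rfl]
      exact List.mem_singleton.mpr rfl
    · rw [if_neg hj0, if_pos hj] at hle
      omega
  · intro j k hjk
    induction k with
    | zero =>
      simp only [frB, List.mem_singleton] at hjk
      subst hjk
      rw [hget 0]
      simp
    | succ k _ =>
      rw [mem_frB_succ] at hjk
      obtain ⟨i, _, hi0, _⟩ := hjk
      omega

theorem stepB_inv (strs : List String) (t : String) (hP : ¬ ("" ∈ strs)) (m : Nat)
    (hm : m < t.toList.length) (dp : List Int) (hinv : InvB strs t m dp) :
    InvB strs t (m+1)
      (if PySem.List.pyGetD dp ((m:Nat):Int) 0 ≤ (t.toList.length : Int) then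
        strs.foldl (relaxF t m (PySem.List.pyGetD dp ((m:Nat):Int) 0 + 1)) dp
      else dp) := by
  obtain ⟨hlen, hnn, hS, hC⟩ := hinv
  rw [PySem.List.pyGetD_natCast]
  by_cases hg : dp.getD m 0 ≤ (t.toList.length : Int)
  · rw [if_pos hg]
    obtain ⟨hlen', hb, hcmp, hd⟩ :=
      relaxB_spec t m (dp.getD m 0 + 1) strs dp hlen
    have hmS : m ∈ frB strs t.toList t.toList.length ((dp.getD m 0).toNat) :=
      hS m (by omega) hg
    refine ⟨hlen', ?_, ?_, ?_⟩
    · intro j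
      rcases hb j with heq | ⟨hbase, _⟩
      · rw [heq]; exact hnn j
      · rw [hbase]
        have := hnn m
        omega
    · intro j hj hle
      rcases hb j with heq | ⟨hbase, w, hw, hpre, hjeq, hjn⟩
      · rw [heq] at hle ⊢
        exact hS j hj hle
      · rw [hbase]
        have h0 : 0 ≤ dp.getD m 0 := hnn m
        have htn : (dp.getD m 0 + 1).toNat = (dp.getD m 0).toNat + 1 := by omega
        rw [htn, mem_frB_succ]
        refine ⟨m, hmS, hm, ?_⟩
        rw [mem_succM]
        exact ⟨w, hw, hpre, hjeq⟩
    · intro j k hjk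
      rcases frB_shift strs t.toList hP m k j hjk with hL | ⟨k', rfl, hmk, hsm⟩
      · exact le_trans (hcmp j) (hC j k hL)
      · have h1 : dp.getD m 0 ≤ (k' : Int) := hC m k' hmk
        rw [mem_succM] at hsm
        obtain ⟨w, hw, hpre, hjeq⟩ := hsm
        have hjn : j ≤ t.toList.length := by
          have := hpre.length_le
          simp only [List.length_drop] at this
          omega
        have := hd w hw j hjeq hjn hpre
        push_cast
        omega
  · rw [if_neg hg]
    refine ⟨hlen, hnn, hS, ?_⟩
    intro j k hjk
    rcases frB_shift strs t.toList hP m k j hjk with hL | ⟨k', rfl, hmk, _⟩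
    · exact hC j k hL
    · have h1 : dp.getD m 0 ≤ (k' : Int) := hC m k' hmk
      have hk'm : k' ≤ m := (frB_bounds strs t.toList hP m k' m (by omega) hmk).1
      exfalso
      apply hg
      have : (k' : Int) ≤ (t.toList.length : Int) := by
        exact_mod_cast Nat.le_trans hk'm (by omega)
      omega

theorem B_main (strs : List String) (t : String) (hP : ¬ ("" ∈ strs))
    (hn : 1 ≤ t.toList.length) : solution_alt strs t = ansM strs t.toList := by
  unfold solution_alt
  dsimp only
  rw [PySem.Str.len_eq]
  rw [show ((t.toList.length : Int)).toNat = t.toList.length from Int.toNat_natCast _]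
  rw [PySem.List.pyRange_zero_natCast, List.foldl_map]
  have inv : ∀ M : Nat, M ≤ t.toList.length → InvB strs t M (List.foldl
      (fun (x : List Int) (y : Nat) =>
        if PySem.List.pyGetD x ((y : Nat) : Int) 0 ≤ (t.toList.length : Int) then
          List.foldl (relaxF t y (PySem.List.pyGetD x ((y : Nat) : Int) 0 + 1)) x strs
        else x)
      (0 :: List.replicate t.toList.length ((t.toList.length : Int) + 1)) (List.range M)) := by
    intro M
    induction M with
    | zero =>
      intro _
      simpa using invB_init strs t
    | succ M ih =>
      intro hM
      rw [List.range_succ, List.foldl_append, List.foldl_cons, List.foldl_nil]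
      exact stepB_inv strs t hP M (by omega) _ (ih (by omega))
  obtain ⟨hlen, hnn, hS, hC⟩ := inv t.toList.length (le_refl _)
  have hfe : (fun (x : List Int) (y : Nat) =>
        if PySem.List.pyGetD x ((y : Nat) : Int) 0 ≤ (t.toList.length : Int) then
          List.foldl (relaxF t y (PySem.List.pyGetD x ((y : Nat) : Int) 0 + 1)) x strs
        else x)
      = (fun (x : List Int) (y : Nat) =>
          if PySem.List.pyGetD x ((y : Nat) : Int) 0 ≤ (t.toList.length : Int) then
            List.foldl (fun dp w =>
              if ((y : Nat) : Int) + PySem.Str.len w ≤ (t.toList.length : Int) ∧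
                  (PySem.Str.slice t (some ((y : Nat) : Int))
                    (some (((y : Nat) : Int) + PySem.Str.len w)) == w) = true ∧
                  PySem.List.pyGetD x ((y : Nat) : Int) 0 + 1
                    < PySem.List.pyGetD dp (((y : Nat) : Int) + PySem.Str.len w) 0
              then PySem.List.pySetD dp (((y : Nat) : Int) + PySem.Str.len w)
                    (PySem.List.pyGetD x ((y : Nat) : Int) 0 + 1)
              else dp) x strs
          else x) := rfl
  rw [← hfe]
  rw [show ((t.toList.length : Int)) = (((t.toList.length : Nat)) : Int) from rfl,
    PySem.List.pyGetD_natCast]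
  set dpF := (List.foldl
      (fun (x : List Int) (y : Nat) =>
        if PySem.List.pyGetD x ((y : Nat) : Int) 0 ≤ (t.toList.length : Int) then
          List.foldl (relaxF t y (PySem.List.pyGetD x ((y : Nat) : Int) 0 + 1)) x strs
        else x)
      (0 :: List.replicate t.toList.length ((t.toList.length : Int) + 1))
      (List.range t.toList.length)) with hdpF
  by_cases hv : dpF.getD t.toList.length 0 ≤ (t.toList.length : Int)
  · rw [if_pos hv]
    have hmem : t.toList.length ∈ frB strs t.toList t.toList.length
        ((dpF.getD t.toList.length 0).toNat) := hS _ (le_refl _) hv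
    have hex : ∃ k, t.toList.length ∈ frB strs t.toList t.toList.length k := ⟨_, hmem⟩
    have hcle : Nat.find hex ≤ (dpF.getD t.toList.length 0).toNat := Nat.find_min' hex hmem
    have h0 : 0 ≤ dpF.getD t.toList.length 0 := hnn _
    have hfind : (List.range (t.toList.length + 2)).find?
        (fun k => decide (t.toList.length ∈ frB strs t.toList t.toList.length k))
        = some (Nat.find hex) := by
      apply find?_range_some
      · intro k hk
        simp only [decide_eq_false_iff_not]
        exact Nat.find_min hex hk
      · simp only [decide_eq_true_eq]
        exact Nat.find_spec hex
      · omega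
    unfold ansM
    rw [hfind]
    dsimp only
    have hvc := hC _ (Nat.find hex) (Nat.find_spec hex)
    omega
  · rw [if_neg hv]
    unfold ansM
    rw [find?_range_none]
    intro k hk
    simp only [decide_eq_false_iff_not]
    intro hmem
    have h1 := hC _ k hmem
    have h2 := (frB_bounds strs t.toList hP _ k _ (le_refl _) hmem).1
    apply hv
    have : (k : Int) ≤ (t.toList.length : Int) := by exact_mod_cast h2
    omega

-- ---------- the empty-string case ----------

theorem A_empty (strs : List String) (hP : ¬ ("" ∈ strs)) : solution strs "" = -1 := by
  have hsucc : succM strs "".toList 0 = [] := by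
    unfold succM
    rw [List.filter_eq_nil_iff.mpr ?_]
    · rfl
    · intro w hw
      simp only [List.isPrefixOf_iff_prefix, decide_eq_true_eq]
      intro hpre
      have : w.toList = [] := List.prefix_nil.mp (by simpa using hpre)
      have hweq : w = "" := String.toList_inj.mp (by simp [this])
      exact hP (hweq ▸ hw)
  have hc0 : cache0A strs "" = [] := by
    rw [cache0A_eq, hsucc]
    rfl
  unfold solution
  dsimp only
  rw [hc0]
  have hget : ((PySem.Dict.empty.insert (0:Int) ([] : List Int)).getD (0:Int) [])
      = ([] : List Int) := by
    unfold PySem.Dict.getD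
    rw [PySem.Dict.get?_insert_self]
    rfl
  rw [hget]
  rfl

theorem B_empty (strs : List String) (hP : ¬ ("" ∈ strs)) : solution_alt strs "" = 0 := by
  rfl


-- ===== VERDICT (by name: the statement is the Claim_ definition above) =====
theorem solution_spec : Claim_unchanged_solution := by
  intro strs t _ hpre hD
  have hn : 1 ≤ t.toList.length := by
    rcases Nat.eq_zero_or_pos t.toList.length with h | h
    · exfalso
      apply hD
      unfold D_solution
      exact String.toList_inj.mp (by simpa using List.eq_nil_of_length_eq_zero h)
    · exact h
  rw [A_main strs t hpre hn, B_main strs t hpre hn]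
theorem solution_changed : Claim_changed_solution := by
  unfold Claim_changed_solution; decide
theorem solution_tight : Claim_exact_solution := by
  intro strs t _ hpre hD
  unfold D_solution at hD
  subst hD
  rw [A_empty strs hpre, B_empty strs hpre]
  decide
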